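-- pv_equiv track=rewrite | github.com/BAH-HA/IST-Projects | 1stYear/Foundations_of_Programming/1st_Project/Projeto_1_BDB.py | corrigir_doc
-- ===== SOURCE A (Python) =====
-- letras_minusculas = ['a','b','c','d','e','f','g','h','i','j','k','l','m','n','o','p','q','r','s','t','u','v','w','x','y','z']
--
-- letras_maiusculas = ['A','B','C','D','E','F','G','H','I','J','K','L','M','N','O','P','Q','R','S','T','U','V','W','X','Y','Z']
--
-- def corrigir_palavra(string):
--     i = 0
--     while i < 26:
--         seq_minmai = letras_minusculas[i] + letras_maiusculas[i]  # Duas letras ex.:'aA'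
--         seq_maimin = letras_maiusculas[i] + letras_minusculas[i]  # Duas letras ex.:'Qq'
--         if seq_minmai in string:
--             string = string.replace(seq_minmai,'')
--         if seq_maimin in string:
--             string = string.replace(seq_maimin,'')
--         i += 1
--         if i == 26:                                                                                                                 # verifica se apos o primeiro
--             for c in range(26):                                                                                                     # ciclo ainda há surtos
--                 if letras_minusculas[c] + letras_maiusculas[c] in string or letras_maiusculas[c] + letras_minusculas[c] in string:  # de letras e repete caso haja
--                     i = 0
--     return string
--
-- def verificar_string(string1):
--     return type(string1) == str and all(x.isalpha() or x.isspace() for x in string1) and len(string1.split()) - 1 == string1.count(' ') and len(string1) != 0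
--
-- def corrigir_doc(string):
--     if verificar_string(string):
--         lista_palavras = []
--         lista_palavras_minusculas = []
--         lista_palavras_final = []
--         count = 0
--         lista_anagramas = []
--         for c in string.split():
--             lista_palavras.append(corrigir_palavra(str(c)))                     #retira os surtos de letras e coloca os numa lista
--             lista_palavras_minusculas.append(corrigir_palavra(str(c)).lower())  #retira os surtos de letras e coloca os numa lista com letras minusculas
--         for c in lista_palavras_minusculas:
--             if ''.join(sorted(c)) not in lista_anagramas or lista_palavras_minusculas.count(c) > 1:
--                 lista_anagramas.append(''.join(sorted(c)))                      #coloca os anagramas numa lista (todos minusculos)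
--                 lista_palavras_final.append(lista_palavras[count])              #coloca a palavra correspondente ao index do anagrama na lista de palavras, na lista de palavras final
--             count += 1
--         return ' '.join(lista_palavras_final)                                   #retorna uma string com todas as palavras finais separadas por um espaco
--     else:
--          raise ValueError('corrigir_doc: argumento invalido')
-- ===== SOURCE B (Python) =====
-- _SWAP = {}
-- for _i in range(26):
--     _SWAP[chr(65 + _i)] = chr(97 + _i)
--     _SWAP[chr(97 + _i)] = chr(65 + _i)
--
-- def _cancel(word):
--     st = []
--     push = st.append
--     pop = st.pop
--     swap = _SWAP.get
--     for ch in word: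
--         if st and st[-1] == swap(ch):
--             pop()
--         else:
--             push(ch)
--     return ''.join(st)
--
-- def corrigir_doc(string):
--     if not (type(string) == str and all(x.isalpha() or x.isspace() for x in string)
--             and len(string.split()) - 1 == string.count(' ') and len(string) != 0):
--         raise ValueError('corrigir_doc: argumento invalido')
--     words = [_cancel(w) for w in string.split()]
--     lowers = [w.lower() for w in words]
--     freq = {}
--     for lw in lowers:
--         freq[lw] = freq.get(lw, 0) + 1
--     seen = set()
--     out = []
--     for w, lw in zip(words, lowers):
--         sig = ''.join(sorted(lw))
--         if sig not in seen or freq[lw] > 1: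
--             seen.add(sig)
--             out.append(w)
--     return ' '.join(out)
-- ===== Notes on version B (the rewrite author's own statement) =====
-- stated objective: faster
-- what changed: Per word, A repeatedly sweeps all 26 letter patterns with str.replace until no adjacent opposite-case pair remains and dedups with linear list membership plus repeated list.count; B cancels adjacent opposite-case pairs in a single stack pass per word (using a precomputed case-swap dict) and dedups with a frequency dict built once plus a set of seen anagram signatures.
import Mathlib
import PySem

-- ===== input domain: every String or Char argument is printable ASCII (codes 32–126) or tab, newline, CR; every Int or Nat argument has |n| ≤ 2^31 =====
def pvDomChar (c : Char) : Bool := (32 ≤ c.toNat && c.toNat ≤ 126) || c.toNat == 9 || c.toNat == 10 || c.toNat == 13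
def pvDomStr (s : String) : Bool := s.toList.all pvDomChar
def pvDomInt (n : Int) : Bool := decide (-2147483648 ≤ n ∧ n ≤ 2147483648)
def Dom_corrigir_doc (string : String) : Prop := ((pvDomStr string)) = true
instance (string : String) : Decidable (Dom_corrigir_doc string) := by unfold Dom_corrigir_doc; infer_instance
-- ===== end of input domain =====

-- B replaces A's per-word 26-pattern replace-until-fixpoint with one stack pass that cancels
-- adjacent case-pairs, and A's list-membership/list.count dedup with a frequency dict built once
-- plus a set of seen anagram signatures.

-- ===== PORT A =====
def pvMin : List Char :=
  ['a','b','c','d','e','f','g','h','i','j','k','l','m','n','o','p','q','r','s','t','u','v','w','x','y','z']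

def pvMai : List Char :=
  ['A','B','C','D','E','F','G','H','I','J','K','L','M','N','O','P','Q','R','S','T','U','V','W','X','Y','Z']

def pvReplStep (s : List Char) (i : Nat) : List Char :=
  let mn := pvMin.getD i ' '
  let mj := pvMai.getD i ' '
  let s1 := if PySem.Chars.isIn [mn, mj] s then PySem.Chars.replace s [mn, mj] [] else s
  if PySem.Chars.isIn [mj, mn] s1 then PySem.Chars.replace s1 [mj, mn] [] else s1

def pvPass (s : List Char) : List Char := (List.range 26).foldl pvReplStep s

def pvHasSurto (s : List Char) : Bool :=
  (List.range 26).any (fun c =>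
    PySem.Chars.isIn [pvMin.getD c ' ', pvMai.getD c ' '] s ||
    PySem.Chars.isIn [pvMai.getD c ' ', pvMin.getD c ' '] s)

-- termination facts for A's while loop (cited by `decreasing_by` of pvCorrigirPalavra below)
theorem pv_prefix2_iff (a b : Char) (l : List Char) :
    ([a,b] : List Char).isPrefixOf l = true ↔ ∃ t, l = a :: b :: t := by
  cases l with
  | nil => simp [List.isPrefixOf]
  | cons x t => cases t <;> simp [List.isPrefixOf] <;> aesop

theorem pv_go_len_le (a b : Char) :
    ∀ (fuel : Nat) (l acc : List Char),
      (PySem.Chars.replace.go [a,b] [] fuel l acc).length ≤ acc.length + l.length := by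
  intro fuel
  induction fuel with
  | zero => intro l acc; rw [PySem.Chars.replace.go]; simp
  | succ n ih =>
    intro l acc
    cases l with
    | nil => rw [PySem.Chars.replace.go]; simp; intro h; omega
    | cons c t =>
      rw [PySem.Chars.replace.go]
      by_cases hp : ([a,b] : List Char).isPrefixOf (c :: t) = true
      · obtain ⟨t', ht⟩ := (pv_prefix2_iff a b _).mp hp
        simp only [ht]
        have h1 := ih (List.drop 2 (a :: b :: t')) acc
        simp at h1 ⊢
        omega
      · simp only [hp, if_false, Bool.false_eq_true]
        have h1 := ih t (c :: acc)
        simp at h1 ⊢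
        omega

theorem pv_go_len_lt (a b : Char) :
    ∀ (fuel : Nat) (l acc : List Char), l.length ≤ fuel → [a,b] <:+: l →
      (PySem.Chars.replace.go [a,b] [] fuel l acc).length < acc.length + l.length := by
  intro fuel
  induction fuel with
  | zero =>
    intro l acc hf hinf
    have hl : l = [] := List.length_eq_zero_iff.mp (Nat.le_zero.mp hf)
    subst hl
    simp [List.infix_nil] at hinf
  | succ n ih =>
    intro l acc hf hinf
    cases l with
    | nil => simp [List.infix_nil] at hinf
    | cons c t =>
      rw [PySem.Chars.replace.go]
      by_cases hp : ([a,b] : List Char).isPrefixOf (c :: t) = true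
      · obtain ⟨t', ht⟩ := (pv_prefix2_iff a b _).mp hp
        simp only [ht]
        have h1 := pv_go_len_le a b n (List.drop 2 (a :: b :: t')) acc
        simp at h1 ⊢
        omega
      · simp only [hp, if_false, Bool.false_eq_true]
        rcases List.infix_cons_iff.mp hinf with h | h
        · exact absurd (List.isPrefixOf_iff_prefix.mpr h) (by simpa using hp)
        · have h1 := ih t (c :: acc) (by simp at hf ⊢; omega) h
          simp at h1 ⊢
          omega

theorem pv_replace_len_le (s : List Char) (a b : Char) :
    (PySem.Chars.replace s [a, b] []).length ≤ s.length := by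
  rw [PySem.Chars.replace]
  simpa using pv_go_len_le a b s.length s []

theorem pv_replace_len_lt (s : List Char) (a b : Char)
    (h : PySem.Chars.isIn [a, b] s = true) :
    (PySem.Chars.replace s [a, b] []).length < s.length := by
  rw [PySem.Chars.replace]
  have h1 := pv_go_len_lt a b s.length s [] le_rfl ((PySem.Chars.isIn_iff_infix _ _).mp h)
  simpa using h1

theorem pv_replStep_cases (s : List Char) (i : Nat) :
    (pvReplStep s i = s ∧
      PySem.Chars.isIn [pvMin.getD i ' ', pvMai.getD i ' '] s = false ∧
      PySem.Chars.isIn [pvMai.getD i ' ', pvMin.getD i ' '] s = false) ∨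
    (pvReplStep s i).length < s.length := by
  unfold pvReplStep
  set mn := pvMin.getD i ' '
  set mj := pvMai.getD i ' '
  by_cases h1 : PySem.Chars.isIn [mn, mj] s = true
  · right
    simp only [h1, if_true]
    have hlt := pv_replace_len_lt s mn mj h1
    by_cases h2 : PySem.Chars.isIn [mj, mn] (PySem.Chars.replace s [mn, mj] []) = true
    · simp only [h2, if_true]
      have := pv_replace_len_le (PySem.Chars.replace s [mn, mj] []) mj mn
      omega
    · simp only [h2]
      simp only [Bool.not_eq_true] at h2
      simp [hlt]
  · simp only [Bool.not_eq_true] at h1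
    simp only [h1, if_false, Bool.false_eq_true]
    by_cases h2 : PySem.Chars.isIn [mj, mn] s = true
    · right
      simp only [h2, if_true]
      exact pv_replace_len_lt s mj mn h2
    · left
      simp only [Bool.not_eq_true] at h2
      simp [h2]

theorem pv_foldl_replStep_len_le (l : List Nat) (s : List Char) :
    (l.foldl pvReplStep s).length ≤ s.length := by
  induction l generalizing s with
  | nil => simp
  | cons i l ih =>
    simp only [List.foldl_cons]
    have h := pv_replStep_cases s i
    rcases h with ⟨he, -, -⟩ | hlt
    · rw [he]; exact ih s
    · exact le_trans (ih _) (le_of_lt hlt)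

theorem pv_foldl_replStep_fix (l : List Nat) (s : List Char)
    (h : (l.foldl pvReplStep s).length = s.length) :
    l.foldl pvReplStep s = s ∧ ∀ i ∈ l,
      PySem.Chars.isIn [pvMin.getD i ' ', pvMai.getD i ' '] s = false ∧
      PySem.Chars.isIn [pvMai.getD i ' ', pvMin.getD i ' '] s = false := by
  induction l generalizing s with
  | nil => simp
  | cons i l ih =>
    simp only [List.foldl_cons] at h ⊢
    rcases pv_replStep_cases s i with ⟨he, hf1, hf2⟩ | hlt
    · rw [he] at h ⊢
      obtain ⟨h1, h2⟩ := ih s h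
      refine ⟨h1, ?_⟩
      intro j hj
      rcases List.mem_cons.mp hj with rfl | hj
      · exact ⟨hf1, hf2⟩
      · exact h2 j hj
    · exfalso
      have := pv_foldl_replStep_len_le l (pvReplStep s i)
      omega

theorem pv_pass_surto_lt (s : List Char) (h : pvHasSurto (pvPass s) = true) :
    (pvPass s).length < s.length := by
  rcases Nat.lt_or_ge (pvPass s).length s.length with hlt | hge
  · exact hlt
  · exfalso
    have hle := pv_foldl_replStep_len_le (List.range 26) s
    have heq : (pvPass s).length = s.length := le_antisymm hle hge
    obtain ⟨hfix, hall⟩ := pv_foldl_replStep_fix (List.range 26) s heq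
    unfold pvHasSurto at h
    rw [pvPass] at h
    rw [hfix] at h
    rw [List.any_eq_true] at h
    obtain ⟨i, hi, hor⟩ := h
    obtain ⟨h1, h2⟩ := hall i hi
    rw [h1, h2] at hor
    simp at hor

-- A's corrigir_palavra: one sweep i = 0..25, then the i == 26 re-scan; repeat while a pattern remains
def pvCorrigirPalavra (s : List Char) : List Char :=
  let s' := pvPass s
  if pvHasSurto s' = true then pvCorrigirPalavra s' else s'
termination_by s.length
decreasing_by exact pv_pass_surto_lt s (by assumption)

-- A's verificar_string (type(string1) == str is always true for a String argument)
def pvVerificar (s : List Char) : Bool :=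
  (s.all fun x => PySem.Chars.isalpha x || PySem.Chars.isspace x) &&
  (PySem.List.len (PySem.Chars.split₀ s) - 1 == (PySem.Chars.count s [' '] : Int)) &&
  (s.length != 0)

-- A's second loop body: state = (lista_anagramas, lista_palavras_final, count)
def pvStep2 (P M : List (List Char))
    (st : List (List Char) × List (List Char) × Int) (c : List Char) :
    List (List Char) × List (List Char) × Int :=
  let sig := PySem.List.sorted c id
  if !st.1.contains sig || decide (PySem.List.count M c > 1) then
    (st.1 ++ [sig], st.2.1 ++ [PySem.List.pyGetD P st.2.2 []], st.2.2 + 1)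
  else
    (st.1, st.2.1, st.2.2 + 1)

def corrigir_doc (string : String) : String :=
  let s := string.toList
  if pvVerificar s then
    let pr := (PySem.Chars.split₀ s).foldl
      (fun (pr : List (List Char) × List (List Char)) c =>
        (pr.1 ++ [pvCorrigirPalavra c], pr.2 ++ [PySem.Chars.lower (pvCorrigirPalavra c)]))
      ([], [])
    let r := pr.2.foldl (pvStep2 pr.1 pr.2) ([], [], 0)
    String.ofList (PySem.Chars.join [' '] r.2.1)
  else ""

-- ===== PORT B =====
-- Source B's module-level _SWAP dict: each letter maps to its other-case partner
def pvSwapD : PySem.Dict Char Char :=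
  (List.range 26).foldl
    (fun d i =>
      (d.insert (Char.ofNat (65 + i)) (Char.ofNat (97 + i))).insert
        (Char.ofNat (97 + i)) (Char.ofNat (65 + i)))
    PySem.Dict.empty

-- one step of _cancel's stack loop (head of the list = top of the stack);
-- Python's 'st and st[-1] == swap(ch)' (swap = _SWAP.get; == None is False)
def pvCancelStep (st : List Char) (ch : Char) : List Char :=
  match st with
  | [] => [ch]
  | t :: r => if pvSwapD.get? ch == some t then r else ch :: st

def pvCancel (w : List Char) : List Char := (w.foldl pvCancelStep []).reverse

-- stack invariant: no adjacent cancellable pair inside the stack (head = top)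

-- freq = {lw: multiplicity} over the lowered words, built once
def pvFreq (lows : List (List Char)) : PySem.Dict (List Char) Int :=
  lows.foldl (fun d lw => d.insert lw (d.getD lw 0 + 1)) PySem.Dict.empty

-- one step of Source B's dedup loop: state = (seen, out), input = (w, lw)
def pvStepB (freq : PySem.Dict (List Char) Int)
    (st : PySem.Set (List Char) × List (List Char)) (p : List Char × List Char) :
    PySem.Set (List Char) × List (List Char) :=
  let sig := PySem.List.sorted p.2 id
  if !st.1.contains sig || decide (freq.getD p.2 0 > 1) then
    (PySem.Set.add st.1 sig, st.2 ++ [p.1])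
  else
    st

def corrigir_doc_alt (string : String) : String :=
  let s := string.toList
  if !((s.all fun x => PySem.Chars.isalpha x || PySem.Chars.isspace x) &&
       (PySem.List.len (PySem.Chars.split₀ s) - 1 == (PySem.Chars.count s [' '] : Int)) &&
       (s.length != 0)) then
    ""
  else
    let words := (PySem.Chars.split₀ s).map pvCancel
    let lows := words.map PySem.Chars.lower
    let freq := pvFreq lows
    let r := (words.zip lows).foldl (pvStepB freq) (PySem.Set.empty, [])
    String.ofList (PySem.Chars.join [' '] r.2)

-- ===== PRECONDITION & SPEC =====
-- Pre_ is exactly A's verificar_string check: on all other inputs A (and B) raise a ValueError.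
def Pre_corrigir_doc (string : String) : Prop :=
  string.toList ≠ [] ∧
  (string.toList.all fun c => PySem.Chars.isalpha c || PySem.Chars.isspace c) = true ∧
  PySem.List.len (PySem.Chars.split₀ string.toList) - 1 = (PySem.Chars.count string.toList [' '] : Int)
instance (string : String) : Decidable (Pre_corrigir_doc string) := by unfold Pre_corrigir_doc; infer_instance

def pvWitness_corrigir_doc : String := "abc aAcb"

def Spec_corrigir_doc (string : String) (out : String) : Prop := out = corrigir_doc_alt string
instance (string : String) (out : String) : Decidable (Spec_corrigir_doc string out) := by unfold Spec_corrigir_doc; infer_instance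

-- ===== CLAIM (what is proved, stated in full; the proofs are below) =====
def Claim_equal_corrigir_doc : Prop := ∀ (string : String), Dom_corrigir_doc string → Pre_corrigir_doc string → Spec_corrigir_doc string (corrigir_doc string)

-- ===== LEMMAS AND PROOFS =====

-- proof-side pair test: x and t are the same letter in opposite cases
def pvPairb (x t : Char) : Bool :=
  (x != t) && (PySem.Chars.lowerChar x == PySem.Chars.lowerChar t)
theorem pv_toNat_inj {x y : Char} (h : x.toNat = y.toNat) : x = y := by
  rw [← Char.ofNat_toNat x, ← Char.ofNat_toNat y, h]

theorem pv_toNat_ofNat (n : Nat) (h : n < 0xD800) : (Char.ofNat n).toNat = n := by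
  rw [Char.toNat_ofNat]; simp [Nat.isValidChar]; omega

theorem pv_pairb_iff (x y : Char) :
    pvPairb x y = true ↔ x ≠ y ∧ PySem.Chars.lowerChar x = PySem.Chars.lowerChar y := by
  simp [pvPairb]

theorem pv_isupper_iff (x : Char) : PySem.Chars.isupper x = true ↔ 65 ≤ x.toNat ∧ x.toNat ≤ 90 := by
  constructor
  · intro h
    simp only [PySem.Chars.isupper, Bool.and_eq_true, decide_eq_true_eq] at h
    exact ⟨h.1, h.2⟩
  · intro h
    simp only [PySem.Chars.isupper, Bool.and_eq_true, decide_eq_true_eq]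
    exact ⟨h.1, h.2⟩

theorem pv_pairb_char {x y : Char} (h : pvPairb x y = true) :
    ∃ i : Nat, i < 26 ∧
      ((x.toNat = 97 + i ∧ y.toNat = 65 + i) ∨ (x.toNat = 65 + i ∧ y.toNat = 97 + i)) := by
  obtain ⟨hne, hlow⟩ := (pv_pairb_iff x y).mp h
  unfold PySem.Chars.lowerChar at hlow
  by_cases hx : PySem.Chars.isupper x = true <;> by_cases hy : PySem.Chars.isupper y = true
  · exfalso
    obtain ⟨hx1, hx2⟩ := (pv_isupper_iff x).mp hx
    obtain ⟨hy1, hy2⟩ := (pv_isupper_iff y).mp hy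
    rw [if_pos hx, if_pos hy] at hlow
    have := congrArg Char.toNat hlow
    rw [pv_toNat_ofNat _ (by omega), pv_toNat_ofNat _ (by omega)] at this
    exact hne (pv_toNat_inj (by omega))
  · obtain ⟨hx1, hx2⟩ := (pv_isupper_iff x).mp hx
    rw [if_pos hx, if_neg hy] at hlow
    have := congrArg Char.toNat hlow
    rw [pv_toNat_ofNat _ (by omega)] at this
    exact ⟨x.toNat - 65, by omega, Or.inr (by omega)⟩
  · obtain ⟨hy1, hy2⟩ := (pv_isupper_iff y).mp hy
    rw [if_neg hx, if_pos hy] at hlow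
    have := congrArg Char.toNat hlow
    rw [pv_toNat_ofNat _ (by omega)] at this
    exact ⟨y.toNat - 65, by omega, Or.inl (by omega)⟩
  · exfalso
    rw [if_neg hx, if_neg hy] at hlow
    exact hne hlow

theorem pv_pairb_symm (x y : Char) : pvPairb x y = pvPairb y x := by
  simp only [pvPairb]
  rw [bne_comm, Bool.and_comm, BEq.comm, Bool.and_comm]

theorem pv_pairb_assoc {a b c : Char} (h1 : pvPairb a b = true) (h2 : pvPairb b c = true) :
    a = c := by
  obtain ⟨i, hi, hcase1⟩ := pv_pairb_char h1
  obtain ⟨j, hj, hcase2⟩ := pv_pairb_char h2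
  apply pv_toNat_inj
  omega

theorem pv_table : ∀ i ∈ List.range 26,
    (pvMin.getD i ' ').toNat = 97 + i ∧ (pvMai.getD i ' ').toNat = 65 + i := by decide

theorem pv_pairMinMai : ∀ i ∈ List.range 26,
    pvPairb (pvMin.getD i ' ') (pvMai.getD i ' ') = true ∧
    pvPairb (pvMai.getD i ' ') (pvMin.getD i ' ') = true := by decide

theorem pv_pair_pattern {x y : Char} (h : pvPairb x y = true) :
    ∃ i ∈ List.range 26,
      ([x, y] = [pvMin.getD i ' ', pvMai.getD i ' '] ∨
       [x, y] = [pvMai.getD i ' ', pvMin.getD i ' ']) := by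
  obtain ⟨i, hi, hcase⟩ := pv_pairb_char h
  obtain ⟨hmin, hmai⟩ := pv_table i (List.mem_range.mpr hi)
  refine ⟨i, List.mem_range.mpr hi, ?_⟩
  rcases hcase with ⟨hx, hy⟩ | ⟨hx, hy⟩
  · left; rw [pv_toNat_inj (x := x) (by omega : x.toNat = (pvMin.getD i ' ').toNat),
              pv_toNat_inj (x := y) (by omega : y.toNat = (pvMai.getD i ' ').toNat)]
  · right; rw [pv_toNat_inj (x := x) (by omega : x.toNat = (pvMai.getD i ' ').toNat),
               pv_toNat_inj (x := y) (by omega : y.toNat = (pvMin.getD i ' ').toNat)]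

-- the SWAP-dict condition of the B port coincides with pvPairb
set_option maxRecDepth 8192 in
theorem pv_swapD_pairs : ∀ p ∈ pvSwapD.items, pvPairb p.1 p.2 = true := by decide

set_option maxRecDepth 8192 in
theorem pv_swapD_table : ∀ i ∈ List.range 26,
    pvSwapD.get? (Char.ofNat (97 + i)) = some (Char.ofNat (65 + i)) ∧
    pvSwapD.get? (Char.ofNat (65 + i)) = some (Char.ofNat (97 + i)) := by decide

theorem pv_swap_get_iff (ch t : Char) : pvSwapD.get? ch = some t ↔ pvPairb ch t = true := by
  constructor
  · intro h
    unfold PySem.Dict.get? at h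
    rcases Option.map_eq_some_iff.mp h with ⟨p, hfind, hp2⟩
    have hmem := List.mem_of_find?_eq_some hfind
    have hbeq := List.find?_some hfind
    have h1 : p.1 = ch := by simpa using hbeq
    have := pv_swapD_pairs p hmem
    rw [h1, hp2] at this
    exact this
  · intro h
    obtain ⟨i, hi, hcase⟩ := pv_pairb_char h
    obtain ⟨hlo, hhi⟩ := pv_swapD_table i (List.mem_range.mpr hi)
    rcases hcase with ⟨hx, hy⟩ | ⟨hx, hy⟩
    · rw [pv_toNat_inj (x := ch) (y := Char.ofNat (97 + i))
            (by rw [pv_toNat_ofNat _ (by omega)]; omega),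
          pv_toNat_inj (x := t) (y := Char.ofNat (65 + i))
            (by rw [pv_toNat_ofNat _ (by omega)]; omega)]
      exact hlo
    · rw [pv_toNat_inj (x := ch) (y := Char.ofNat (65 + i))
            (by rw [pv_toNat_ofNat _ (by omega)]; omega),
          pv_toNat_inj (x := t) (y := Char.ofNat (97 + i))
            (by rw [pv_toNat_ofNat _ (by omega)]; omega)]
      exact hhi

-- proof-side step function: the same stack step phrased with pvPairb
def pvStepP (st : List Char) (ch : Char) : List Char :=
  match st with
  | [] => [ch]
  | t :: r => if pvPairb ch t then r else ch :: st

theorem pv_cancelStep_pairb (st : List Char) (ch : Char) :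
    pvCancelStep st ch = pvStepP st ch := by
  unfold pvStepP
  cases st with
  | nil => rfl
  | cons t r =>
    show (if pvSwapD.get? ch == some t then r else ch :: t :: r) =
      (if pvPairb ch t then r else ch :: t :: r)
    by_cases h : pvPairb ch t = true
    · rw [if_pos h, if_pos (by rw [beq_iff_eq]; exact (pv_swap_get_iff ch t).mpr h)]
    · rw [if_neg h, if_neg ?_]
      intro hc
      exact h ((pv_swap_get_iff ch t).mp (by simpa using hc))

theorem pv_cancelStep_eq : pvCancelStep = pvStepP := by
  funext st ch; exact pv_cancelStep_pairb st ch

def pvRed (st : List Char) : Prop := List.IsChain (fun a b => pvPairb a b = false) st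

theorem pv_step_red {st : List Char} (h : pvRed st) (ch : Char) : pvRed (pvStepP st ch) := by
  unfold pvRed pvStepP
  cases st with
  | nil => exact List.isChain_singleton ch
  | cons t r =>
    by_cases hp : pvPairb ch t = true
    · simp only [hp, if_true]
      exact h.tail
    · simp only [hp, if_false, Bool.false_eq_true]
      exact List.isChain_cons_cons.mpr ⟨by simpa using hp, h⟩

theorem pv_cancel_pair {a b : Char} (hab : pvPairb a b = true) (v : List Char) :
    ∀ (u st : List Char), pvRed st →
      List.foldl pvStepP st (u ++ a :: b :: v) = List.foldl pvStepP st (u ++ v) := by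
  intro u
  induction u with
  | nil =>
    intro st hst
    simp only [List.nil_append, List.foldl_cons]
    cases st with
    | nil =>
      show List.foldl pvStepP (pvStepP [a] b) v = List.foldl pvStepP [] v
      have hba : pvPairb b a = true := by rw [pv_pairb_symm]; exact hab
      simp [pvStepP, hba]
    | cons t r =>
      by_cases hp : pvPairb a t = true
      · rw [pv_pairb_symm a t] at hp
        have hbt : t = b := pv_pairb_assoc hp hab
        have hstep : pvStepP (t :: r) a = r := by
          rw [pv_pairb_symm t a] at hp
          simp [pvStepP, hp]
        rw [hstep]
        cases r with
        | nil => simp [pvStepP, hbt]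
        | cons s r' =>
          have hts : pvPairb t s = false := by
            have := List.isChain_cons_cons.mp hst
            simpa using this.1
          have hstep2 : pvStepP (s :: r') b = t :: s :: r' := by
            rw [← hbt]
            simp [pvStepP, hts]
          rw [hstep2]
      · have hstep : pvStepP (t :: r) a = a :: t :: r := by simp [pvStepP, hp]
        rw [hstep]
        have hba : pvPairb b a = true := by rw [pv_pairb_symm]; exact hab
        simp [pvStepP, hba]
  | cons c u ih =>
    intro st hst
    simp only [List.cons_append, List.foldl_cons]
    exact ih (pvStepP st c) (pv_step_red hst c)

theorem pv_foldl_nopair :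
    ∀ (cs st : List Char),
      List.IsChain (fun p q => pvPairb q p = false) (st.reverse ++ cs) →
      List.foldl pvStepP st cs = cs.reverse ++ st := by
  intro cs
  induction cs with
  | nil => intro st _; simp
  | cons c cs ih =>
    intro st h
    simp only [List.foldl_cons]
    have hstep : pvStepP st c = c :: st := by
      cases st with
      | nil => rfl
      | cons t r =>
        have htc : pvPairb c t = false := by
          have h2 := (List.isChain_append.mp h).2.2 t (by simp) c (by simp)
          exact h2
        simp [pvStepP, htc]
    rw [hstep]
    have hrw : (c :: st).reverse ++ cs = st.reverse ++ c :: cs := by simp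
    rw [ih (c :: st) (by rw [hrw]; exact h)]
    simp

theorem pv_go_cancel {a b : Char} (hab : pvPairb a b = true) :
    ∀ (fuel : Nat) (l acc st : List Char), pvRed st → l.length ≤ fuel →
      List.foldl pvStepP st (PySem.Chars.replace.go [a,b] [] fuel l acc) =
      List.foldl pvStepP st (acc.reverse ++ l) := by
  intro fuel
  induction fuel with
  | zero =>
    intro l acc st hst hf
    have hl : l = [] := List.length_eq_zero_iff.mp (Nat.le_zero.mp hf)
    subst hl
    rw [PySem.Chars.replace.go]
  | succ n ih =>
    intro l acc st hst hf
    cases l with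
    | nil => rw [PySem.Chars.replace.go]; simp; intro h; omega
    | cons c t =>
      rw [PySem.Chars.replace.go]
      by_cases hp : ([a,b] : List Char).isPrefixOf (c :: t) = true
      · obtain ⟨t', ht⟩ := (pv_prefix2_iff a b _).mp hp
        have hp' : ([a,b] : List Char).isPrefixOf (a :: b :: t') = true := ht ▸ hp
        rw [ht]
        simp only [hp', if_true]
        rw [show List.drop ([a,b] : List Char).length (a :: b :: t') = t' by simp]
        rw [show (([] : List Char).reverse ++ acc) = acc by simp]
        rw [ih t' acc st hst (by simp [ht] at hf; omega)]
        exact (pv_cancel_pair hab t' acc.reverse st hst).symm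
      · simp only [hp, if_false, Bool.false_eq_true]
        rw [ih t (c :: acc) st hst (by simp at hf ⊢; omega)]
        simp

theorem pv_cancel_replace {a b : Char} (hab : pvPairb a b = true) (s : List Char) :
    pvCancel (PySem.Chars.replace s [a,b] []) = pvCancel s := by
  unfold pvCancel
  rw [pv_cancelStep_eq, PySem.Chars.replace]
  simp only [List.isEmpty_cons, if_false, Bool.false_eq_true]
  rw [pv_go_cancel hab s.length s [] [] (by unfold pvRed; simp) le_rfl]
  simp

theorem pv_cancel_replStep (s : List Char) (i : Nat) (hi : i ∈ List.range 26) :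
    pvCancel (pvReplStep s i) = pvCancel s := by
  obtain ⟨h1, h2⟩ := pv_pairMinMai i hi
  unfold pvReplStep
  have c1 : pvCancel (if PySem.Chars.isIn [pvMin.getD i ' ', pvMai.getD i ' '] s = true then
      PySem.Chars.replace s [pvMin.getD i ' ', pvMai.getD i ' '] [] else s) = pvCancel s := by
    split
    · exact pv_cancel_replace h1 s
    · rfl
  set s1 := (if PySem.Chars.isIn [pvMin.getD i ' ', pvMai.getD i ' '] s = true then
      PySem.Chars.replace s [pvMin.getD i ' ', pvMai.getD i ' '] [] else s) with hs1
  show pvCancel (if PySem.Chars.isIn [pvMai.getD i ' ', pvMin.getD i ' '] s1 = true then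
      PySem.Chars.replace s1 [pvMai.getD i ' ', pvMin.getD i ' '] [] else s1) = pvCancel s
  split
  · rw [pv_cancel_replace h2 s1]; exact c1
  · exact c1

theorem pv_cancel_foldl_replStep (l : List Nat) (hl : ∀ i ∈ l, i ∈ List.range 26) :
    ∀ s : List Char, pvCancel (l.foldl pvReplStep s) = pvCancel s := by
  induction l with
  | nil => intro s; rfl
  | cons i l ih =>
    intro s
    simp only [List.foldl_cons]
    rw [ih (fun j hj => hl j (List.mem_cons_of_mem i hj))]
    exact pv_cancel_replStep s i (hl i List.mem_cons_self)

theorem pv_palavra_unfold (s : List Char) :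
    pvCorrigirPalavra s =
      (if pvHasSurto (pvPass s) = true then pvCorrigirPalavra (pvPass s) else pvPass s) := by
  rw [pvCorrigirPalavra.eq_def]

theorem pv_cancel_palavra (s : List Char) : pvCancel (pvCorrigirPalavra s) = pvCancel s := by
  induction s using pvCorrigirPalavra.induct with
  | case1 s s' hs ih =>
    rw [pv_palavra_unfold, if_pos hs, ih]
    exact pv_cancel_foldl_replStep (List.range 26) (fun i hi => hi) s
  | case2 s s' hs =>
    rw [pv_palavra_unfold, if_neg hs]
    exact pv_cancel_foldl_replStep (List.range 26) (fun i hi => hi) s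

theorem pv_surto_palavra (s : List Char) : pvHasSurto (pvCorrigirPalavra s) = false := by
  induction s using pvCorrigirPalavra.induct with
  | case1 s s' hs ih => rw [pv_palavra_unfold, if_pos hs]; exact ih
  | case2 s s' hs => rw [pv_palavra_unfold, if_neg hs]; simpa using hs

theorem pv_isIn_mono {s' s : List Char} (sub : List Char) (h : s' <:+: s)
    (hin : PySem.Chars.isIn sub s' = true) : PySem.Chars.isIn sub s = true := by
  rw [PySem.Chars.isIn_iff_infix] at hin ⊢
  exact hin.trans h

theorem pv_nosurto_mono {s' s : List Char} (h : s' <:+: s) (hs : pvHasSurto s = false) :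
    pvHasSurto s' = false := by
  unfold pvHasSurto at hs ⊢
  rw [List.any_eq_false] at hs ⊢
  intro i hi
  have hsi := hs i hi
  simp only [Bool.or_eq_true, not_or, Bool.not_eq_true] at hsi ⊢
  constructor
  · by_contra hc
    rw [Bool.not_eq_false] at hc
    rw [pv_isIn_mono _ h hc] at hsi
    exact absurd hsi.1 (by simp)
  · by_contra hc
    rw [Bool.not_eq_false] at hc
    rw [pv_isIn_mono _ h hc] at hsi
    exact absurd hsi.2 (by simp)

theorem pv_nosurto_chain (s : List Char) (hs : pvHasSurto s = false) :
    List.IsChain (fun p q => pvPairb q p = false) s := by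
  induction s with
  | nil => simp
  | cons p t ih =>
    cases t with
    | nil => exact List.isChain_singleton p
    | cons q t' =>
      refine List.isChain_cons_cons.mpr ⟨?_, ih (pv_nosurto_mono (List.suffix_cons p _).isInfix hs)⟩
      by_contra hqp
      rw [Bool.not_eq_false] at hqp
      have hpq : pvPairb p q = true := by rw [pv_pairb_symm]; exact hqp
      obtain ⟨i, hi, hpat⟩ := pv_pair_pattern hpq
      have hinf : ([p, q] : List Char) <:+: (p :: q :: t') := ⟨[], t', by simp⟩
      unfold pvHasSurto at hs
      rw [List.any_eq_false] at hs
      have hsi := hs i hi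
      simp only [Bool.or_eq_true, not_or, Bool.not_eq_true] at hsi
      rcases hpat with hp1 | hp1
      · have hIn : PySem.Chars.isIn [pvMin.getD i ' ', pvMai.getD i ' '] (p :: q :: t') = true := by
          rw [← hp1, PySem.Chars.isIn_iff_infix]; exact hinf
        rw [hIn] at hsi
        exact absurd hsi.1 (by simp)
      · have hIn : PySem.Chars.isIn [pvMai.getD i ' ', pvMin.getD i ' '] (p :: q :: t') = true := by
          rw [← hp1, PySem.Chars.isIn_iff_infix]; exact hinf
        rw [hIn] at hsi
        exact absurd hsi.2 (by simp)

theorem pv_chain_cancel_id (s : List Char)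
    (h : List.IsChain (fun p q => pvPairb q p = false) s) : pvCancel s = s := by
  unfold pvCancel
  rw [pv_cancelStep_eq, pv_foldl_nopair s [] (by simpa using h)]
  simp

theorem pv_palavra_eq_cancel : pvCorrigirPalavra = pvCancel := by
  funext s
  have h1 := pv_surto_palavra s
  have h2 := pv_chain_cancel_id _ (pv_nosurto_chain _ h1)
  rw [← h2, pv_cancel_palavra]

theorem pv_build_pair (f g : List Char → List Char) :
    ∀ (l : List (List Char)) (a b : List (List Char)),
      l.foldl (fun pr c => (pr.1 ++ [f c], pr.2 ++ [g c])) (a, b) =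
        (a ++ l.map f, b ++ l.map g) := by
  intro l
  induction l with
  | nil => intro a b; simp
  | cons c l ih =>
    intro a b
    simp only [List.foldl_cons, List.map_cons]
    rw [ih]
    simp

theorem pv_getD_append (l1 l2 : List (List Char)) (y : List Char) (d : List Char) :
    PySem.List.pyGetD (l1 ++ y :: l2) ((l1.length : Nat) : Int) d = y := by
  unfold PySem.List.pyGetD
  rw [PySem.List.pyGet?_append_length]
  rfl

theorem pv_contains_add {anag : List (List Char)} {seen : PySem.Set (List Char)}
    (h : ∀ x : List Char, anag.contains x = seen.contains x) (sig : List Char) :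
    ∀ x : List Char, (anag ++ [sig]).contains x = (PySem.Set.add seen sig).contains x := by
  intro x
  unfold PySem.Set.add
  by_cases hseen : seen.contains sig = true
  · rw [if_pos hseen]
    rw [List.contains_append]
    by_cases hx : x = sig
    · subst hx
      rw [h x, hseen]
      simp
    · have h1 : ([sig].contains x) = false := by
        simp [hx]
      rw [h1, Bool.or_false, h x]
  · rw [if_neg hseen]
    rw [List.contains_append]
    rw [show ((seen ++ [sig] : List (List Char)).contains x) =
      (seen.contains x || [sig].contains x) from List.contains_append]
    rw [h x]

theorem pv_loop2 (f g : List Char → List Char) (M : List (List Char))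
    (freq : PySem.Dict (List Char) Int)
    (hfreq : ∀ x : List Char, freq.getD x 0 = (PySem.List.count M x : Int)) :
    ∀ (rest pre anag fin : List (List Char)) (seen : PySem.Set (List Char)),
      (∀ x : List Char, anag.contains x = seen.contains x) →
      ((rest.map g).foldl (pvStep2 (pre.map f ++ rest.map f) M)
          (anag, fin, ((pre.length : Nat) : Int))).2.1
        = (((rest.map f).zip (rest.map g)).foldl (pvStepB freq) (seen, fin)).2 := by
  intro rest
  induction rest with
  | nil => intro pre anag fin seen h; rfl
  | cons w rest ih =>
    intro pre anag fin seen h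
    simp only [List.map_cons, List.zip_cons_cons, List.foldl_cons]
    have hidx : PySem.List.pyGetD (pre.map f ++ f w :: rest.map f) ((pre.length : Nat) : Int) []
        = f w := by
      have h0 := pv_getD_append (pre.map f) (rest.map f) (f w) []
      rwa [List.length_map] at h0
    have hcnt : decide (freq.getD (g w) 0 > 1) = decide (PySem.List.count M (g w) > 1) := by
      rw [hfreq]
      apply decide_eq_decide.mpr
      constructor <;> intro <;> omega
    have hP : pre.map f ++ (w :: rest).map f = (pre ++ [w]).map f ++ rest.map f := by
      simp
    have hlen : ((pre.length : Nat) : Int) + 1 = (((pre ++ [w]).length : Nat) : Int) := by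
      simp
    show (((rest).map g).foldl (pvStep2 (pre.map f ++ f w :: rest.map f) M)
        (pvStep2 (pre.map f ++ f w :: rest.map f) M (anag, fin, ((pre.length : Nat) : Int)) (g w))).2.1
      = (((rest.map f).zip (rest.map g)).foldl (pvStepB freq)
          (pvStepB freq (seen, fin) (f w, g w))).2
    unfold pvStep2 pvStepB
    simp only [h (PySem.List.sorted (g w) id), hcnt, hidx]
    by_cases hc : (!seen.contains (PySem.List.sorted (g w) id)
        || decide (PySem.List.count M (g w) > 1)) = true
    · rw [hc]
      simp only [if_true]
      have hmap : pre.map f ++ f w :: rest.map f = (pre ++ [w]).map f ++ rest.map f := by simp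
      rw [hmap, hlen]
      exact ih (pre ++ [w]) (anag ++ [PySem.List.sorted (g w) id]) (fin ++ [f w])
        (PySem.Set.add seen (PySem.List.sorted (g w) id))
        (pv_contains_add h (PySem.List.sorted (g w) id))
    · rw [Bool.not_eq_true] at hc
      rw [hc]
      simp only [Bool.false_eq_true, if_false]
      have hmap : pre.map f ++ f w :: rest.map f = (pre ++ [w]).map f ++ rest.map f := by simp
      rw [hmap, hlen]
      exact ih (pre ++ [w]) anag fin seen h

theorem pv_freq_count (L : List (List Char)) (x : List Char) :
    (pvFreq L).getD x 0 = (PySem.List.count L x : Int) := by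
  unfold pvFreq PySem.List.count
  rw [PySem.Dict.getD_foldl_insert_add_one]
  simp [PySem.Dict.empty, PySem.Dict.getD, PySem.Dict.get?]

theorem corrigir_doc_eq (s : String) : corrigir_doc s = corrigir_doc_alt s := by
  simp only [corrigir_doc, corrigir_doc_alt]
  by_cases hv : pvVerificar s.toList = true
  · rw [if_pos hv]
    unfold pvVerificar at hv
    rw [hv]
    simp only [Bool.not_true, Bool.false_eq_true, if_false]
    have hpr := pv_build_pair pvCorrigirPalavra
      (fun c => PySem.Chars.lower (pvCorrigirPalavra c)) (PySem.Chars.split₀ s.toList) [] []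
    simp only [List.nil_append] at hpr
    rw [hpr]
    simp only [pv_palavra_eq_cancel]
    have hlows : ((PySem.Chars.split₀ s.toList).map pvCancel).map PySem.Chars.lower
        = (PySem.Chars.split₀ s.toList).map (fun c => PySem.Chars.lower (pvCancel c)) := by
      rw [List.map_map]; rfl
    simp only [hlows]
    have hmain := pv_loop2 pvCancel (fun c => PySem.Chars.lower (pvCancel c))
      ((PySem.Chars.split₀ s.toList).map (fun c => PySem.Chars.lower (pvCancel c)))
      (pvFreq ((PySem.Chars.split₀ s.toList).map (fun c => PySem.Chars.lower (pvCancel c))))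
      (fun x => pv_freq_count _ x)
      (PySem.Chars.split₀ s.toList) [] [] [] PySem.Set.empty (fun x => rfl)
    simp only [List.map_nil, List.nil_append, List.length_nil, Nat.cast_zero] at hmain
    rw [hmain]
  · rw [if_neg hv]
    unfold pvVerificar at hv
    rw [Bool.not_eq_true] at hv
    rw [hv]
    simp

-- ===== VERDICT (by name: the statement is the Claim_ definition above) =====
theorem corrigir_doc_spec : Claim_equal_corrigir_doc := by
  intro string _ _
  exact corrigir_doc_eq string
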